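-- pv_equiv track=rewrite | github.com/khang200923/Predicate_Wars | predicate/utils.py | subSeqIndexes
-- ===== SOURCE A (Python) =====
-- from typing import Any, Callable, List, Optional, Sequence, Set, Tuple
--
-- def subSeqIndexes(subseq: Sequence, seq: Sequence) -> Tuple[int]:
--     #From https://stackoverflow.com/questions/425604/best-way-to-determine-if-a-sequence-is-in-another-sequence
--     """
--     Return starting indexes of the subsequence in the sequence.
--     """
--     i, n, m = -1, len(seq), len(subseq)
--     matches = []
--     try:
--         while True:
--             i = seq.index(subseq[0], i + 1, n - m + 1)
--             if subseq == seq[i:i + m]: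
--                 matches.append(i)
--     except ValueError:
--         return tuple(matches)
-- ===== SOURCE B (Python) =====
-- def subSeqIndexes(subseq, seq):
--     """Return starting indexes of the subsequence in the sequence."""
--     sub = list(subseq)
--     s = list(seq)
--     m = len(sub)
--     return tuple(i for i in range(len(s) - m + 1) if s[i:i + m] == sub)
-- ===== Notes on version B (the rewrite author's own statement) =====
-- stated objective: simpler
-- what changed: Replaced A's exception-driven while-loop (repeated seq.index jumps to candidate first-element positions, then slice compare) by a single direct comprehension filtering every window start; Pre_ excludes only the empty subseq, on which A raises IndexError.
import Mathlib
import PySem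

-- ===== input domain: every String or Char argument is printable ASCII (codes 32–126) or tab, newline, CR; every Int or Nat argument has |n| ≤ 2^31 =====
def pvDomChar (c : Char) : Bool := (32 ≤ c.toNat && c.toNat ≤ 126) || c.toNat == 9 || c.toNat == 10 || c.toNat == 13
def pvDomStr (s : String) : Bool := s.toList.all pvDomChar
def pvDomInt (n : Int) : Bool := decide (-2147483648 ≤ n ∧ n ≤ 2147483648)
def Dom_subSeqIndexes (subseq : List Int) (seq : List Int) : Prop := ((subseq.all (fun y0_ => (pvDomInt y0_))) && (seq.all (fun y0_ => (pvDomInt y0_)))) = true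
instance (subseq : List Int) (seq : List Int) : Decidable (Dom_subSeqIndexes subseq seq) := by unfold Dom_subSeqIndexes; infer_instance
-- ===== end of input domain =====

-- B replaces A's exception-driven while-loop (seq.index jumps + slice compare) by one direct
-- comprehension filtering every window start; same return value wherever A returns (objective: simpler).

-- ===== PORT A =====
-- A's `while True: i = seq.index(subseq[0], i+1, n-m+1); …` — seq.index is a left-to-right scan,
-- so the loop as a whole scans s = 0,1,2,… below stopN (the Python-clamped stop bound of list.index),
-- consing s when the first element matches and the slice equals subseq; ValueError (scan exhausted) ends it.
def subSeqIndexesLoop (x : Int) (subseq seq : List Int) (m stopN : Nat) (s : Nat) : List Int :=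
  if _h : s < stopN then
    if seq.getD s 0 = x then
      if subseq = PySem.List.slice seq (some (s : Int)) (some ((s : Int) + (m : Int))) then
        (s : Int) :: subSeqIndexesLoop x subseq seq m stopN (s + 1)
      else subSeqIndexesLoop x subseq seq m stopN (s + 1)
    else subSeqIndexesLoop x subseq seq m stopN (s + 1)
  else []
termination_by stopN - s

def subSeqIndexes (subseq : List Int) (seq : List Int) : List Int :=
  match subseq with
  | [] => []  -- Python raises IndexError on subseq[0]; outside Pre_
  | x :: _ =>
    let n := seq.length
    let m := subseq.length
    let stopI : Int := (n : Int) - (m : Int) + 1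
    -- list.index clamps its stop argument: a negative stop gets +n (then floors at 0), and it is capped at n
    let stopN : Nat := min (if stopI < 0 then ((n : Int) + stopI).toNat else stopI.toNat) n
    subSeqIndexesLoop x subseq seq m stopN 0

-- ===== PORT B =====
def subSeqIndexes_alt (subseq : List Int) (seq : List Int) : List Int :=
  (PySem.List.pyRange 0 ((seq.length : Int) - (subseq.length : Int) + 1) 1).filter
    (fun i => decide (PySem.List.slice seq (some i) (some (i + (subseq.length : Int))) = subseq))

-- ===== PRECONDITION & SPEC =====
-- Pre_ excludes only the empty subseq, on which A raises IndexError (subseq[0]).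
def Pre_subSeqIndexes (subseq : List Int) (seq : List Int) : Prop := subseq ≠ []
instance (subseq : List Int) (seq : List Int) : Decidable (Pre_subSeqIndexes subseq seq) := by unfold Pre_subSeqIndexes; infer_instance
def pvWitness_subSeqIndexes : List Int × List Int := ([1, 2], [1, 2, 1, 1, 2])

def Spec_subSeqIndexes (subseq : List Int) (seq : List Int) (out : List Int) : Prop := out = subSeqIndexes_alt subseq seq
instance (subseq : List Int) (seq : List Int) (out : List Int) : Decidable (Spec_subSeqIndexes subseq seq out) := by unfold Spec_subSeqIndexes; infer_instance

-- ===== CLAIM (what is proved, stated in full; the proofs are below) =====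
def Claim_equal_subSeqIndexes : Prop := ∀ (subseq : List Int) (seq : List Int), Dom_subSeqIndexes subseq seq → Pre_subSeqIndexes subseq seq → Spec_subSeqIndexes subseq seq (subSeqIndexes subseq seq)

-- ===== LEMMAS AND PROOFS =====

-- a slice shorter than the (nonempty) subseq can never equal it
theorem slice_ne_of_short (x : Int) (t seq : List Int) (j : Nat)
    (hlen : seq.length < j + (x :: t).length) :
    x :: t ≠ PySem.List.slice seq (some (j : Int)) (some ((j : Int) + ((x :: t).length : Int))) := by
  intro heq
  have h := congrArg List.length heq
  rw [PySem.List.slice_natCast_add, List.length_take, List.length_drop] at h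
  simp only [List.length_cons] at h hlen
  omega

-- A's loop from s computes the slice-equality filter over [s, stopN), cast to Int
-- (positions whose first element differs from x fail the slice comparison anyway).
theorem subSeqIndexesLoop_eq (x : Int) (t seq : List Int) (stopN : Nat)
    (hstop : stopN ≤ seq.length) :
    ∀ s : Nat, subSeqIndexesLoop x (x :: t) seq (x :: t).length stopN s =
      ((List.range' s (stopN - s)).filter
        (fun (j : Nat) => decide ((x :: t) = PySem.List.slice seq (some (j : Int)) (some ((j : Int) + ((x :: t).length : Int)))))).map
        (fun (j : Nat) => (j : Int)) := by
  have main : ∀ k s, stopN - s = k → subSeqIndexesLoop x (x :: t) seq (x :: t).length stopN s =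
      ((List.range' s k).filter
        (fun (j : Nat) => decide ((x :: t) = PySem.List.slice seq (some (j : Int)) (some ((j : Int) + ((x :: t).length : Int)))))).map
        (fun (j : Nat) => (j : Int)) := by
    intro k
    induction k with
    | zero =>
      intro s hk
      rw [subSeqIndexesLoop, dif_neg (by omega)]
      simp
    | succ k ih =>
      intro s hk
      have hs : s < stopN := by omega
      have hsn : s < seq.length := lt_of_lt_of_le hs hstop
      rw [subSeqIndexesLoop, dif_pos hs, List.range'_succ, List.filter_cons]
      by_cases hx : seq.getD s 0 = x
      · rw [if_pos hx, ih (s+1) (by omega)]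
        by_cases hsl : (x :: t) = PySem.List.slice seq (some (s : Int)) (some ((s : Int) + ((x :: t).length : Int)))
        · rw [if_pos hsl, if_pos (decide_eq_true hsl), List.map_cons]
        · rw [if_neg hsl, if_neg (by simpa using hsl)]
      · rw [if_neg hx, ih (s+1) (by omega)]
        have hne : ¬ ((x :: t) = PySem.List.slice seq (some (s : Int)) (some ((s : Int) + ((x :: t).length : Int)))) := by
          rw [PySem.List.slice_natCast_add, List.drop_eq_getElem_cons hsn]
          intro heq
          rw [List.length_cons, List.take_succ_cons] at heq
          injection heq with h3 _
          exact hx (by rw [List.getD_eq_getElem seq 0 hsn, h3])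
        rw [if_neg (by simpa using hne)]
  intro s; exact main (stopN - s) s rfl

theorem main_eq (x : Int) (t seq : List Int) :
    subSeqIndexes (x :: t) seq = subSeqIndexes_alt (x :: t) seq := by
  have hA : subSeqIndexes (x :: t) seq = subSeqIndexesLoop x (x :: t) seq (x :: t).length
      (min (if ((seq.length : Int) - ((x :: t).length : Int) + 1) < 0
            then ((seq.length : Int) + ((seq.length : Int) - ((x :: t).length : Int) + 1)).toNat
            else ((seq.length : Int) - ((x :: t).length : Int) + 1).toNat) seq.length) 0 := rfl
  rw [hA]
  by_cases hmn : (x :: t).length ≤ seq.length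
  · have hm1 : 1 ≤ (x :: t).length := by simp [List.length_cons]
    have hstopN : (min (if ((seq.length : Int) - ((x :: t).length : Int) + 1) < 0
            then ((seq.length : Int) + ((seq.length : Int) - ((x :: t).length : Int) + 1)).toNat
            else ((seq.length : Int) - ((x :: t).length : Int) + 1).toNat) seq.length)
          = seq.length - (x :: t).length + 1 := by
      split_ifs with h <;> omega
    rw [hstopN, subSeqIndexesLoop_eq x t seq _ (by omega) 0, Nat.sub_zero]
    have hcast : (seq.length : Int) - ((x :: t).length : Int) + 1
        = ((seq.length - (x :: t).length + 1 : Nat) : Int) := by push_cast; omega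
    unfold subSeqIndexes_alt
    rw [hcast, PySem.List.pyRange_zero_natCast, List.filter_map, ← List.range_eq_range']
    congr 1
    apply List.filter_congr
    intro j _
    simp only [Function.comp_apply]
    exact decide_eq_decide.mpr eq_comm
  · have hstop_le : (min (if ((seq.length : Int) - ((x :: t).length : Int) + 1) < 0
            then ((seq.length : Int) + ((seq.length : Int) - ((x :: t).length : Int) + 1)).toNat
            else ((seq.length : Int) - ((x :: t).length : Int) + 1).toNat) seq.length) ≤ seq.length :=
      Nat.min_le_right _ _
    generalize hgen : (min (if ((seq.length : Int) - ((x :: t).length : Int) + 1) < 0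
            then ((seq.length : Int) + ((seq.length : Int) - ((x :: t).length : Int) + 1)).toNat
            else ((seq.length : Int) - ((x :: t).length : Int) + 1).toNat) seq.length) = sN at hstop_le ⊢
    rw [subSeqIndexesLoop_eq x t seq sN hstop_le 0, Nat.sub_zero]
    have hfilt : (List.range' 0 sN).filter
        (fun (j : Nat) => decide ((x :: t) = PySem.List.slice seq (some (j : Int)) (some ((j : Int) + ((x :: t).length : Int))))) = [] := by
      apply List.filter_eq_nil_iff.mpr
      intro j _
      simp only [decide_eq_true_eq]
      exact slice_ne_of_short x t seq j (by omega)
    rw [hfilt]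
    unfold subSeqIndexes_alt
    rw [PySem.List.pyRange_one_eq_nil (by omega)]
    simp

-- ===== VERDICT (by name: the statement is the Claim_ definition above) =====
theorem subSeqIndexes_spec : Claim_equal_subSeqIndexes := by
  intro subseq seq _ hpre
  unfold Spec_subSeqIndexes
  match subseq with
  | [] => exact absurd rfl hpre
  | x :: t => exact main_eq x t seq
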